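-- pv_equiv track=rewrite | github.com/D3struf/Killer-Sudoku | test.py | switch_numbers_in_cage
-- ===== SOURCE A (Python) =====
-- from itertools import permutations
--
-- def switch_numbers_in_cage(board, cage, cage_idx, max_errors_cage_index):
--     new_board = [row[:] for row in board]  # Create a copy of the board
--     cage_sum, cells = cage
--     numbers = [1, 2, 3, 4]
--     perm_limit = 0
--     perm_idx = 0
--
--     for perm in permutations(numbers, len(cells)):
--         if sum(perm) == cage_sum:
--             perm_limit += 1
--
--     if perm_limit > cage_idx[max_errors_cage_index]:
--         cage_idx[max_errors_cage_index] += 1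
--     else:
--         cage_idx[max_errors_cage_index] = 1
--
--     for perm in permutations(numbers, len(cells)):
--         if sum(perm) == cage_sum and perm_idx < cage_idx[max_errors_cage_index]:
--             for idx, (row, col) in enumerate(cells):
--                 new_board[row][col] = perm[idx]
--             perm_idx += 1
--
--     return new_board
-- ===== SOURCE B (Python) =====
-- from itertools import permutations
--
-- def switch_numbers_in_cage(board, cage, cage_idx, max_errors_cage_index):
--     cage_sum, cells = cage
--     # Build the list of valid permutations ONCE instead of re-scanning twice.
--     valid = [p for p in permutations([1, 2, 3, 4], len(cells)) if sum(p) == cage_sum]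
--     if len(valid) > cage_idx[max_errors_cage_index]:
--         cage_idx[max_errors_cage_index] += 1
--     else:
--         cage_idx[max_errors_cage_index] = 1
--     k = min(cage_idx[max_errors_cage_index], len(valid))
--     new_board = [row[:] for row in board]
--     if k >= 1:
--         perm = valid[k - 1]
--         for idx, (row, col) in enumerate(cells):
--             new_board[row][col] = perm[idx]
--     return new_board
-- ===== Notes on version B (the rewrite author's own statement) =====
-- stated objective: simpler
-- what changed: B builds the list of valid permutations once and writes only the single selected permutation (valid[k-1]) onto the board, instead of A's second full scan over all permutations that re-places every valid permutation up to the counter, each placement overwriting the previous one.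
import Mathlib
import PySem

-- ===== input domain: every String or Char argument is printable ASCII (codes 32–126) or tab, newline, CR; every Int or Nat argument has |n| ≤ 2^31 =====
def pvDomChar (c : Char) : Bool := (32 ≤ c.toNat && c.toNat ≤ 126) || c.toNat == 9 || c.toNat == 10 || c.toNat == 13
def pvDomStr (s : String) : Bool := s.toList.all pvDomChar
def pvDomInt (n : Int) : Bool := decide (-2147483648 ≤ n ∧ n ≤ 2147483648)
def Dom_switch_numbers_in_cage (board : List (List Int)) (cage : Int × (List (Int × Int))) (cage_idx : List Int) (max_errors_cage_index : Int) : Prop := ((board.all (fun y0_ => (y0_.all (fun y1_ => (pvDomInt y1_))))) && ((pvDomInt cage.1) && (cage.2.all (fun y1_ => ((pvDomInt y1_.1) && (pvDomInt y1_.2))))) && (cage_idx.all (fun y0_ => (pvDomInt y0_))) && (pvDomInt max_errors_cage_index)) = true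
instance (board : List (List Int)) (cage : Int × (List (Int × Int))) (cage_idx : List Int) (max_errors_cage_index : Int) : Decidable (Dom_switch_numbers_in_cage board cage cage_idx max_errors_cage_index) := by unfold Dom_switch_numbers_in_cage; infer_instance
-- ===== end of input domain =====

-- B replaces A's second scan over all permutations (which re-places every valid permutation up to the
-- counter, each overwriting the last) by one direct index into the list of valid permutations, built once.
-- Both A and B mutate cage_idx[max_errors_cage_index] in place identically in Python; the equivalence
-- proved here is about the RETURN value (the new board).

-- ===== PORT A =====
-- new_board[row][col] = v  (Python index semantics; out-of-range writes are excluded by Pre_, where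
-- Python would raise IndexError; pySetD is exact on the admitted inputs)
def pvSetCell (b : List (List Int)) (r c v : Int) : List (List Int) :=
  PySem.List.pySetD b r (PySem.List.pySetD (PySem.List.pyGetD b r []) c v)

-- 'for idx, (row, col) in enumerate(cells): new_board[row][col] = perm[idx]'
-- (perm[idx] is always in range: perm has exactly len(cells) entries; pyGetD is exact there)
def pvWriteCells (cells : List (Int × Int)) (perm : List Int) (idx : Int) (b : List (List Int)) : List (List Int) :=
  match cells with
  | [] => b
  | rc :: rest => pvWriteCells rest perm (idx + 1) (pvSetCell b rc.1 rc.2 (PySem.List.pyGetD perm idx 0))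

-- A's second for-loop, with its perm_idx counter
def pvLoopA (ps : List (List Int)) (cage_sum k : Int) (cells : List (Int × Int)) (idx : Int) (b : List (List Int)) : List (List Int) :=
  match ps with
  | [] => b
  | p :: rest =>
    if p.sum = cage_sum ∧ idx < k then
      pvLoopA rest cage_sum k cells (idx + 1) (pvWriteCells cells p 0 b)
    else
      pvLoopA rest cage_sum k cells idx b

def switch_numbers_in_cage (board : List (List Int)) (cage : Int × (List (Int × Int))) (cage_idx : List Int) (max_errors_cage_index : Int) : List (List Int) :=
  let new_board := board.map (fun row => row)
  let cage_sum := cage.1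
  let cells := cage.2
  let numbers : List Int := [1, 2, 3, 4]
  let perm_limit : Int :=
    (PySem.List.permutations numbers cells.length).foldl
      (fun acc p => if p.sum = cage_sum then acc + 1 else acc) 0
  let cage_idx1 :=
    if perm_limit > PySem.List.pyGetD cage_idx max_errors_cage_index 0 then
      PySem.List.pySetD cage_idx max_errors_cage_index (PySem.List.pyGetD cage_idx max_errors_cage_index 0 + 1)
    else
      PySem.List.pySetD cage_idx max_errors_cage_index 1
  pvLoopA (PySem.List.permutations numbers cells.length) cage_sum
    (PySem.List.pyGetD cage_idx1 max_errors_cage_index 0) cells 0 new_board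

-- ===== PORT B =====
def switch_numbers_in_cage_alt (board : List (List Int)) (cage : Int × (List (Int × Int))) (cage_idx : List Int) (max_errors_cage_index : Int) : List (List Int) :=
  let cells := cage.2
  let valid := (PySem.List.permutations [1, 2, 3, 4] cells.length).filter (fun p => p.sum == cage.1)
  let old := PySem.List.pyGetD cage_idx max_errors_cage_index 0
  let newv : Int := if (valid.length : Int) > old then old + 1 else 1
  let k := min newv (valid.length : Int)
  let new_board := board.map (fun row => row)
  if 1 ≤ k then
    -- valid[k-1]: 1 ≤ k ≤ len(valid), always in range, pyGetD exact
    pvWriteCells cells (PySem.List.pyGetD valid (k - 1) []) 0 new_board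
  else new_board

-- ===== PRECONDITION & SPEC =====
-- closed-form "some permutation of length r from [1,2,3,4] sums to s"
def pvValidExists (s : Int) (r : Nat) : Prop :=
  (r = 0 ∧ s = 0) ∨ (r = 1 ∧ 1 ≤ s ∧ s ≤ 4) ∨ (r = 2 ∧ 3 ≤ s ∧ s ≤ 7) ∨
  (r = 3 ∧ 6 ≤ s ∧ s ≤ 9) ∨ (r = 4 ∧ s = 10)

-- Exactly the inputs on which the Python A returns: cage_idx[max_errors_cage_index] must exist, and
-- whenever the placement loop actually writes (a valid permutation exists and the counter is ≥ 0),
-- every cell must be a valid Python index into the board; otherwise A raises IndexError.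
def Pre_switch_numbers_in_cage (board : List (List Int)) (cage : Int × (List (Int × Int))) (cage_idx : List Int) (max_errors_cage_index : Int) : Prop :=
  PySem.Raise.InRange cage_idx.length max_errors_cage_index ∧
  ((pvValidExists cage.1 cage.2.length ∧ 0 ≤ PySem.List.pyGetD cage_idx max_errors_cage_index 0) →
    ∀ rc ∈ cage.2, PySem.Raise.InRange board.length rc.1 ∧
      PySem.Raise.InRange (PySem.List.pyGetD board rc.1 []).length rc.2)
instance (board : List (List Int)) (cage : Int × (List (Int × Int))) (cage_idx : List Int) (max_errors_cage_index : Int) : Decidable (Pre_switch_numbers_in_cage board cage cage_idx max_errors_cage_index) := by unfold Pre_switch_numbers_in_cage pvValidExists PySem.Raise.InRange; infer_instance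

def pvWitness_switch_numbers_in_cage : List (List Int) × (Int × (List (Int × Int))) × List Int × Int :=
  ([[0, 0], [0, 0]], (3, [(0, 0), (0, 1)]), [1], 0)

def Spec_switch_numbers_in_cage (board : List (List Int)) (cage : Int × (List (Int × Int))) (cage_idx : List Int) (max_errors_cage_index : Int) (out : List (List Int)) : Prop := out = switch_numbers_in_cage_alt board cage cage_idx max_errors_cage_index
instance (board : List (List Int)) (cage : Int × (List (Int × Int))) (cage_idx : List Int) (max_errors_cage_index : Int) (out : List (List Int)) : Decidable (Spec_switch_numbers_in_cage board cage cage_idx max_errors_cage_index out) := by unfold Spec_switch_numbers_in_cage; infer_instance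

-- ===== CLAIM (what is proved, stated in full; the proofs are below) =====
def Claim_equal_switch_numbers_in_cage : Prop := ∀ (board : List (List Int)) (cage : Int × (List (Int × Int))) (cage_idx : List Int) (max_errors_cage_index : Int), Dom_switch_numbers_in_cage board cage cage_idx max_errors_cage_index → Pre_switch_numbers_in_cage board cage cage_idx max_errors_cage_index → Spec_switch_numbers_in_cage board cage cage_idx max_errors_cage_index (switch_numbers_in_cage board cage cage_idx max_errors_cage_index)

-- ===== LEMMAS AND PROOFS =====

theorem pv_count_eq (ps : List (List Int)) (s : Int) (a : Int) :
    ps.foldl (fun acc p => if p.sum = s then acc + 1 else acc) a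
      = a + ((ps.filter (fun p => p.sum == s)).length : Int) := by
  induction ps generalizing a with
  | nil => simp
  | cons p rest ih =>
    by_cases h : p.sum = s
    · simp [h, ih]; ring
    · simp [h, ih]

theorem pv_pyIdx_some {n : Nat} {i : Int} (h : PySem.Raise.InRange n i) :
    ∃ k : Nat, PySem.List.pyIdx? n i = some k ∧ k < n := by
  obtain ⟨h1, h2⟩ := h
  unfold PySem.List.pyIdx?
  by_cases h0 : 0 ≤ i
  · exact ⟨i.toNat, by simp [h0, h2], by omega⟩
  · refine ⟨n - (-i).toNat, by simp [h0, h1], by omega⟩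

theorem pv_getD_setD_self (xs : List Int) (i v d : Int)
    (h : PySem.Raise.InRange xs.length i) :
    PySem.List.pyGetD (PySem.List.pySetD xs i v) i d = v := by
  obtain ⟨k, hk, hkn⟩ := pv_pyIdx_some h
  simp [PySem.List.pySetD, PySem.List.pySet?, PySem.List.pyGetD, PySem.List.pyGet?, hk, hkn]

theorem pv_pyIdx_lt {n : Nat} {i : Int} {k : Nat} (h : PySem.List.pyIdx? n i = some k) : k < n := by
  unfold PySem.List.pyIdx? at h
  by_cases h0 : 0 ≤ i <;> simp [h0] at h <;> omega


theorem pv_setD_none {α : Type} (xs : List α) (i : Int) (v : α)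
    (h : PySem.List.pyIdx? xs.length i = none) : PySem.List.pySetD xs i v = xs := by
  simp [PySem.List.pySetD, PySem.List.pySet?, h]

theorem pv_setD_some {α : Type} (xs : List α) (i : Int) (v : α) {k : Nat}
    (h : PySem.List.pyIdx? xs.length i = some k) : PySem.List.pySetD xs i v = xs.set k v := by
  simp [PySem.List.pySetD, PySem.List.pySet?, h]

theorem pv_getD_some {α : Type} (xs : List α) (i : Int) (d : α) {k : Nat}
    (h : PySem.List.pyIdx? xs.length i = some k) : PySem.List.pyGetD xs i d = xs[k]'(pv_pyIdx_lt h) := by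
  simp [PySem.List.pyGetD, PySem.List.pyGet?, h, List.getElem?_eq_getElem (pv_pyIdx_lt h)]

def pvShape (b : List (List Int)) : List Nat := b.map List.length

-- the (resolved) position a single Python write touches
def pvTouch (b : List (List Int)) (rc : Int × Int) (i j : Nat) : Prop :=
  PySem.List.pyIdx? b.length rc.1 = some i ∧
  PySem.List.pyIdx? (b.getD i []).length rc.2 = some j

theorem pv_shape_setCell (b : List (List Int)) (r c v : Int) :
    pvShape (pvSetCell b r c v) = pvShape b := by
  unfold pvSetCell pvShape
  cases hk : PySem.List.pyIdx? b.length r with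
  | none => rw [pv_setD_none _ _ _ hk]
  | some k =>
    rw [pv_setD_some _ _ _ hk, pv_getD_some _ _ _ hk, List.map_set, PySem.List.length_pySetD]
    have h2 : (b.map List.length)[k]'(by simpa using pv_pyIdx_lt hk) = (b[k]'(pv_pyIdx_lt hk)).length := by simp
    rw [← h2, List.set_getElem_self]

theorem pv_len_eq {b1 b2 : List (List Int)} (h : pvShape b1 = pvShape b2) : b1.length = b2.length := by
  have := congrArg List.length h; simpa [pvShape] using this

theorem pv_rowlen_eq {b1 b2 : List (List Int)} (h : pvShape b1 = pvShape b2) (i : Nat) :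
    (b1.getD i []).length = (b2.getD i []).length := by
  by_cases hi : i < b1.length
  · have hi2 : i < b2.length := by rw [← pv_len_eq h]; exact hi
    rw [List.getD_eq_getElem _ _ hi, List.getD_eq_getElem _ _ hi2]
    have := congrArg (fun l => l.getD i 0) h
    simpa [pvShape, List.getD_eq_getElem, hi, hi2] using this
  · have hi2 : ¬ i < b2.length := by rw [← pv_len_eq h]; exact hi
    rw [List.getD_eq_default _ _ (by omega), List.getD_eq_default _ _ (by omega)]

theorem pv_touch_shape {b1 b2 : List (List Int)} (h : pvShape b1 = pvShape b2)
    (rc : Int × Int) (i j : Nat) : pvTouch b1 rc i j ↔ pvTouch b2 rc i j := by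
  unfold pvTouch
  rw [pv_len_eq h, pv_rowlen_eq h]


theorem pv_getD_set_self {α : Type} (l : List α) (i : Nat) (x d : α) (h : i < l.length) :
    (l.set i x).getD i d = x := by
  rw [List.getD_eq_getElem?_getD, List.getElem?_set_self h]; rfl

theorem pv_getD_set_ne {α : Type} (l : List α) {i k : Nat} (x d : α) (h : k ≠ i) :
    (l.set k x).getD i d = l.getD i d := by
  rw [List.getD_eq_getElem?_getD, List.getElem?_set_ne h, ← List.getD_eq_getElem?_getD]

theorem pv_setCell_get_touch {b : List (List Int)} {rc : Int × Int} {i j : Nat}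
    (h : pvTouch b rc i j) (v : Int) :
    ((pvSetCell b rc.1 rc.2 v).getD i []).getD j 0 = v := by
  obtain ⟨h1, h2⟩ := h
  have hi := pv_pyIdx_lt h1
  have hj := pv_pyIdx_lt h2
  have hrow : PySem.List.pyGetD b rc.1 [] = b.getD i [] := by
    rw [pv_getD_some _ _ _ h1, List.getD_eq_getElem _ _ hi]
  unfold pvSetCell
  rw [hrow, pv_setD_some _ _ _ h1, pv_setD_some _ _ _ h2,
    pv_getD_set_self _ _ _ _ hi, pv_getD_set_self _ _ _ _ hj]

theorem pv_setCell_get_untouch {b : List (List Int)} {rc : Int × Int} {i j : Nat}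
    (h : ¬ pvTouch b rc i j) (v : Int) :
    ((pvSetCell b rc.1 rc.2 v).getD i []).getD j 0 = (b.getD i []).getD j 0 := by
  unfold pvSetCell
  cases h1 : PySem.List.pyIdx? b.length rc.1 with
  | none => rw [pv_setD_none _ _ _ h1]
  | some k =>
    have hk := pv_pyIdx_lt h1
    have hrow : PySem.List.pyGetD b rc.1 [] = b.getD k [] := by
      rw [pv_getD_some _ _ _ h1, List.getD_eq_getElem _ _ hk]
    rw [hrow, pv_setD_some _ _ _ h1]
    by_cases hki : k = i
    · subst hki
      rw [pv_getD_set_self _ _ _ _ hk]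
      cases h3 : PySem.List.pyIdx? ((b.getD k []).length) rc.2 with
      | none => rw [pv_setD_none _ _ _ h3]
      | some j' =>
        have hjj : j' ≠ j := fun e => h ⟨h1, e ▸ h3⟩
        rw [pv_setD_some _ _ _ h3, pv_getD_set_ne _ _ _ hjj]
    · rw [pv_getD_set_ne _ _ _ hki]

def pvAgree (cells : List (Int × Int)) (b1 b2 : List (List Int)) : Prop :=
  pvShape b1 = pvShape b2 ∧
  ∀ i j : Nat, (∀ rc ∈ cells, ¬ pvTouch b1 rc i j) →
    (b1.getD i []).getD j 0 = (b2.getD i []).getD j 0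

theorem pv_agree_nil {b1 b2 : List (List Int)} (h : pvAgree [] b1 b2) : b1 = b2 := by
  obtain ⟨hs, hv⟩ := h
  apply List.ext_getElem (pv_len_eq hs)
  intro i hi1 hi2
  apply List.ext_getElem
  · have := pv_rowlen_eq hs i
    rwa [List.getD_eq_getElem _ _ hi1, List.getD_eq_getElem _ _ hi2] at this
  · intro j hj1 hj2
    have := hv i j (by simp)
    rwa [List.getD_eq_getElem _ _ hi1, List.getD_eq_getElem _ _ hi2,
      List.getD_eq_getElem _ _ hj1, List.getD_eq_getElem _ _ hj2] at this

theorem pv_agree_cons {x : Int × Int} {cells : List (Int × Int)} {b1 b2 : List (List Int)}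
    (h : pvAgree (x :: cells) b1 b2) (v : Int) :
    pvAgree cells (pvSetCell b1 x.1 x.2 v) (pvSetCell b2 x.1 x.2 v) := by
  obtain ⟨hs, hv⟩ := h
  refine ⟨by rw [pv_shape_setCell, pv_shape_setCell, hs], ?_⟩
  intro i j hun
  have hun' : ∀ rc ∈ cells, ¬ pvTouch b1 rc i j := by
    intro rc hrc
    have := hun rc hrc
    rwa [pv_touch_shape (pv_shape_setCell b1 x.1 x.2 v) rc i j] at this
  by_cases ht : pvTouch b1 x i j
  · rw [pv_setCell_get_touch ht v, pv_setCell_get_touch ((pv_touch_shape hs x i j).mp ht) v]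
  · have ht2 : ¬ pvTouch b2 x i j := fun t => ht ((pv_touch_shape hs x i j).mpr t)
    rw [pv_setCell_get_untouch ht v, pv_setCell_get_untouch ht2 v]
    refine hv i j ?_
    intro rc hrc
    rcases List.mem_cons.mp hrc with e | m
    · subst e; exact ht
    · exact hun' rc m

theorem pv_write_cong (cells : List (Int × Int)) (p : List Int) :
    ∀ (s : Int) {b1 b2 : List (List Int)}, pvAgree cells b1 b2 →
    pvWriteCells cells p s b1 = pvWriteCells cells p s b2 := by
  induction cells with
  | nil => intro s b1 b2 h; exact pv_agree_nil h
  | cons x rest ih =>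
    intro s b1 b2 h
    unfold pvWriteCells
    exact ih (s + 1) (pv_agree_cons h _)

theorem pv_shape_write (cells : List (Int × Int)) (p : List Int) :
    ∀ (s : Int) (b : List (List Int)), pvShape (pvWriteCells cells p s b) = pvShape b := by
  induction cells with
  | nil => intro s b; rfl
  | cons x rest ih =>
    intro s b
    unfold pvWriteCells
    rw [ih, pv_shape_setCell]

theorem pv_write_untouch (cells : List (Int × Int)) (p : List Int) :
    ∀ (s : Int) (b : List (List Int)) {i j : Nat}, (∀ rc ∈ cells, ¬ pvTouch b rc i j) →
    ((pvWriteCells cells p s b).getD i []).getD j 0 = (b.getD i []).getD j 0 := by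
  induction cells with
  | nil => intro s b i j _; rfl
  | cons x rest ih =>
    intro s b i j h
    unfold pvWriteCells
    have hsh := pv_shape_setCell b x.1 x.2 (PySem.List.pyGetD p s 0)
    rw [ih (s + 1) _ (fun rc hrc t => h rc (List.mem_cons_of_mem _ hrc) ((pv_touch_shape hsh rc i j).mp t)),
      pv_setCell_get_untouch (h x List.mem_cons_self) _]

theorem pv_write_absorb (cells : List (Int × Int)) (p q : List Int) (s : Int) (b : List (List Int)) :
    pvWriteCells cells p s (pvWriteCells cells q s b) = pvWriteCells cells p s b := by
  apply pv_write_cong cells p s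
  refine ⟨pv_shape_write cells q s b, ?_⟩
  intro i j h
  exact pv_write_untouch cells q s b
    (fun rc hrc t => h rc hrc ((pv_touch_shape (pv_shape_write cells q s b) rc i j).mpr t))

theorem pv_loopA_noop (ps : List (List Int)) (s k : Int) (cells : List (Int × Int)) :
    ∀ (idx : Int) (b : List (List Int)), k ≤ idx → pvLoopA ps s k cells idx b = b := by
  induction ps with
  | nil => intro idx b _; rfl
  | cons p rest ih =>
    intro idx b h
    unfold pvLoopA
    rw [if_neg (fun hc => absurd hc.2 (by omega))]
    exact ih idx b h

theorem pv_loopA_eq (s k : Int) (cells : List (Int × Int)) :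
    ∀ (ps : List (List Int)) (idx : Int) (b : List (List Int)), idx < k →
    pvLoopA ps s k cells idx b =
      (if (ps.filter (fun p => p.sum == s)) = [] then b
       else pvWriteCells cells
         ((ps.filter (fun p => p.sum == s)).getD
           ((min (k - idx) ((ps.filter (fun p => p.sum == s)).length : Int)).toNat - 1) []) 0 b) := by
  intro ps
  induction ps with
  | nil => intro idx b _; simp [pvLoopA]
  | cons p rest ih =>
    intro idx b hidx
    by_cases hp : p.sum = s
    · have hfil : (p :: rest).filter (fun p => p.sum == s) = p :: rest.filter (fun p => p.sum == s) := by
        simp [hp]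
      rw [hfil]
      unfold pvLoopA
      rw [if_pos ⟨hp, hidx⟩]
      by_cases h2 : idx + 1 < k
      · rw [ih (idx + 1) _ h2]
        by_cases hv : rest.filter (fun p => p.sum == s) = []
        · rw [if_pos hv, if_neg (by simp [hv])]
          have hmin : (min (k - idx) (((p :: rest.filter (fun p => p.sum == s)).length : Nat) : Int)).toNat - 1 = 0 := by
            simp only [hv, List.length_cons, List.length_nil]
            push_cast
            omega
          rw [hmin]
          simp
        · rw [if_neg hv, if_neg (by simp)]
          rw [pv_write_absorb]
          congr 1
          set vs' := rest.filter (fun p => p.sum == s) with hvs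
          have hL : 1 ≤ vs'.length := by
            cases hq : vs' with
            | nil => exact absurd hq hv
            | cons a l => simp
          have hidxeq : (min (k - idx) (((p :: vs').length : Nat) : Int)).toNat - 1
              = ((min (k - (idx + 1)) ((vs'.length : Nat) : Int)).toNat - 1) + 1 := by
            simp only [List.length_cons]
            push_cast
            omega
          rw [hidxeq]
          rw [List.getD_cons_succ]
      · have hk : k = idx + 1 := by omega
        rw [pv_loopA_noop rest s k cells (idx + 1) _ (by omega)]
        rw [if_neg (by simp)]
        have hmin : (min (k - idx) (((p :: rest.filter (fun p => p.sum == s)).length : Nat) : Int)).toNat - 1 = 0 := by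
          subst hk
          simp only [List.length_cons]
          push_cast
          omega
        rw [hmin]
        simp
    · have hfil : (p :: rest).filter (fun p => p.sum == s) = rest.filter (fun p => p.sum == s) := by
        simp [hp]
      rw [hfil]
      unfold pvLoopA
      rw [if_neg (fun hc => absurd hc.1 hp)]
      exact ih idx b hidx

-- ===== VERDICT (by name: the statement is the Claim_ definition above) =====
theorem switch_numbers_in_cage_spec : Claim_equal_switch_numbers_in_cage := by
  unfold Claim_equal_switch_numbers_in_cage
  intro board cage cage_idx mei _ hpre
  obtain ⟨hin, _⟩ := hpre
  unfold Spec_switch_numbers_in_cage switch_numbers_in_cage switch_numbers_in_cage_alt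
  simp only [List.map_id', gt_iff_lt]
  rw [pv_count_eq _ cage.1 0, zero_add]
  set L : Int := (((PySem.List.permutations [1, 2, 3, 4] cage.2.length).filter (fun p => p.sum == cage.1)).length : Int) with hLdef
  set old := PySem.List.pyGetD cage_idx mei 0 with holddef
  have hkA : PySem.List.pyGetD
      (if old < L then PySem.List.pySetD cage_idx mei (old + 1) else PySem.List.pySetD cage_idx mei 1) mei 0
      = (if old < L then old + 1 else 1) := by
    by_cases h : old < L <;> simp [h, pv_getD_setD_self _ _ _ _ hin]
  rw [hkA]
  set newv : Int := if old < L then old + 1 else 1 with hnewdef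
  by_cases hpos : 0 < newv
  · by_cases hnil : (PySem.List.permutations [1, 2, 3, 4] cage.2.length).filter (fun p => p.sum == cage.1) = []
    · rw [pv_loopA_eq cage.1 newv cage.2 _ 0 _ hpos, if_pos hnil]
      have hL0 : L = 0 := by rw [hLdef, hnil]; rfl
      rw [if_neg (by omega)]
    · rw [pv_loopA_eq cage.1 newv cage.2 _ 0 _ hpos, if_neg hnil]
      have hL1 : 1 ≤ L := by
        rw [hLdef]
        cases hq : (PySem.List.permutations [1, 2, 3, 4] cage.2.length).filter (fun p => p.sum == cage.1) with
        | nil => exact absurd hq hnil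
        | cons a l => simp
      rw [if_pos (by omega : (1:Int) ≤ min newv L)]
      have hc : min newv L - 1 = (((min newv L).toNat - 1 : Nat) : Int) := by omega
      rw [hc, PySem.List.pyGetD_natCast]
      rw [sub_zero]
  · rw [pv_loopA_noop _ _ _ _ 0 _ (by omega), if_neg (by omega)]
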